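-- pv_equiv track=rewrite | github.com/Arcadia-1/analog-agents | skills/analog-netlist-crawl/scripts/kernels/r_network.py | _component_of
-- ===== SOURCE A (Python) =====
-- def _component_of(adj: dict[str, list[str]], seeds: set[str]) -> set[str]:
--     """BFS over R-edge adjacency, starting from every seed."""
--     comp = set(seeds)
--     stack = list(seeds)
--     while stack:
--         n = stack.pop()
--         for nb in adj.get(n, ()):
--             if nb not in comp:
--                 comp.add(nb)
--                 stack.append(nb)
--     return comp
-- ===== SOURCE B (Python) =====
-- def _component_of(adj: dict[str, list[str]], seeds: set[str]) -> set[str]: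
--     """Connected component via breadth-first frontier waves (set arithmetic)."""
--     comp = set(seeds)
--     frontier = set(seeds)
--     while frontier:
--         nxt = {nb for n in frontier for nb in adj.get(n, ()) if nb not in comp}
--         comp |= nxt
--         frontier = nxt
--     return comp
-- ===== Notes on version B (the rewrite author's own statement) =====
-- stated objective: alternative
-- what changed: Replaces the per-node LIFO stack loop (pop one node, push each fresh neighbour) by level-order wave expansion: whole frontiers are expanded at once with a set comprehension and set union, no node is ever popped individually.
import Mathlib
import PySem

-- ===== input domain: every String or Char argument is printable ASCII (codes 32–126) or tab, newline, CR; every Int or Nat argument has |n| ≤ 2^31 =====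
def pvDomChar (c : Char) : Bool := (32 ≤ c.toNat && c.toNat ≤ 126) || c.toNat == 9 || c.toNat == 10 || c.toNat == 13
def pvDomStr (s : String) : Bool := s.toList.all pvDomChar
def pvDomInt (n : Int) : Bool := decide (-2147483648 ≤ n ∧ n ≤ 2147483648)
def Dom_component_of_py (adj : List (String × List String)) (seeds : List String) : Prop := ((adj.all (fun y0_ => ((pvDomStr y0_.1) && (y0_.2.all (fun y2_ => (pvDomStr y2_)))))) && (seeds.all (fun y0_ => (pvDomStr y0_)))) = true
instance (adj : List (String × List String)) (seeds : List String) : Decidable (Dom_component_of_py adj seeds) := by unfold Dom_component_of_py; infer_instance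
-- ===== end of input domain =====

-- B replaces A's per-node LIFO stack loop by whole-frontier breadth-first wave expansion
-- (set comprehension + set union); same result set, similar cost ("alternative").
-- Both Pythons return a SET, whose iteration order is not modelled: each port returns the
-- canonical sorted listing of its set's distinct elements (outputs are compared as sets).

-- ===== PORT A =====
-- adj.get(n, ()) : first-match lookup in the association list, default empty
def pyGetAdj (adj : List (String × List String)) (n : String) : List String :=
  PySem.Dict.getD (PySem.Dict.mk adj) n []

-- body of A's inner 'for nb in adj.get(n, ()):' — stack stored top-first (Python pops from the END)
def componentStepA (cs : PySem.Set String × List String) (nb : String) :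
    PySem.Set String × List String :=
  if PySem.Set.contains cs.1 nb then cs else (PySem.Set.add cs.1 nb, nb :: cs.2)

-- A's 'while stack:' loop; fuel only makes the recursion structural (A always terminates)
def componentLoopA (adj : List (String × List String)) :
    Nat → PySem.Set String → List String → PySem.Set String
  | 0, comp, _ => comp
  | _ + 1, comp, [] => comp
  | fuel + 1, comp, n :: rest =>
      let cs := (pyGetAdj adj n).foldl componentStepA (comp, rest)
      componentLoopA adj fuel cs.1 cs.2

def component_of_py (adj : List (String × List String)) (seeds : List String) : List String :=
  PySem.List.sorted
    (componentLoopA adj (seeds.length + (adj.flatMap Prod.snd).length + 1)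
      (PySem.Set.ofList seeds) seeds.reverse)
    (fun x => x) false

-- ===== PORT B =====
-- nxt = {nb for n in frontier for nb in adj.get(n, ()) if nb not in comp}
def waveNext (adj : List (String × List String)) (comp frontier : PySem.Set String) :
    PySem.Set String :=
  frontier.foldl
    (fun nxt n => (pyGetAdj adj n).foldl
      (fun nxt nb => if PySem.Set.contains comp nb then nxt else PySem.Set.add nxt nb) nxt)
    PySem.Set.empty

-- B's 'while frontier:' loop; fuel only makes the recursion structural (B always terminates)
def componentLoopB (adj : List (String × List String)) :
    Nat → PySem.Set String → PySem.Set String → PySem.Set String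
  | 0, comp, _ => comp
  | fuel + 1, comp, frontier =>
      if frontier.isEmpty then comp
      else
        let nxt := waveNext adj comp frontier
        componentLoopB adj fuel (PySem.Set.union comp nxt) nxt

def component_of_py_alt (adj : List (String × List String)) (seeds : List String) : List String :=
  PySem.List.sorted
    (componentLoopB adj ((adj.flatMap Prod.snd).length + 2)
      (PySem.Set.ofList seeds) (PySem.Set.ofList seeds))
    (fun x => x) false

-- ===== PRECONDITION & SPEC =====
def Spec_component_of_py (adj : List (String × List String)) (seeds : List String) (out : List String) : Prop := out = component_of_py_alt adj seeds
instance (adj : List (String × List String)) (seeds : List String) (out : List String) : Decidable (Spec_component_of_py adj seeds out) := by unfold Spec_component_of_py; infer_instance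

-- ===== CLAIM (what is proved, stated in full; the proofs are below) =====
def Claim_equal_component_of_py : Prop := ∀ (adj : List (String × List String)) (seeds : List String), Dom_component_of_py adj seeds → Spec_component_of_py adj seeds (component_of_py adj seeds)

-- ===== LEMMAS AND PROOFS =====

-- reachability from the seed set along adjacency edges
inductive Reach (adj : List (String × List String)) (seeds : List String) : String → Prop
  | seed (n : String) : n ∈ seeds → Reach adj seeds n
  | step (n nb : String) : Reach adj seeds n → nb ∈ pyGetAdj adj n → Reach adj seeds nb

-- every neighbour returned by the lookup occurs among adj's values
theorem mem_pyGetAdj_flatMap (adj : List (String × List String)) (n x : String)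
    (h : x ∈ pyGetAdj adj n) : x ∈ adj.flatMap Prod.snd := by
  unfold pyGetAdj at h
  induction adj with
  | nil => simp [PySem.Dict.getD, PySem.Dict.get?] at h
  | cons p rest ih =>
    obtain ⟨k, v⟩ := p
    simp only [PySem.Dict.getD_eq_get?_getD, PySem.Dict.get?_mk_cons] at h ih
    by_cases hk : k == n
    · simp [hk] at h
      simpa [List.mem_flatMap] using Or.inl h
    · simp [hk] at h
      rcases List.mem_flatMap.mp (ih h) with ⟨q, hq, hx⟩
      exact List.mem_flatMap.mpr ⟨q, by simp [hq], hx⟩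

-- the remaining-node count relative to the value universe
def defc (adj : List (String × List String)) (comp : List String) : Nat :=
  ((adj.flatMap Prod.snd).toFinset \ comp.toFinset).card


theorem defc_one (adj : List (String × List String)) (comp : List String) (x : String)
    (hx : x ∈ adj.flatMap Prod.snd) (hnc : x ∉ comp) :
    defc adj (comp ++ [x]) + 1 = defc adj comp := by
  unfold defc
  have h1 : (comp ++ [x]).toFinset = insert x comp.toFinset := by
    simp [List.toFinset_append]
  rw [h1, Finset.sdiff_insert]
  have hmem : x ∈ (adj.flatMap Prod.snd).toFinset \ comp.toFinset := by
    simp [hx, hnc]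
  rw [Finset.card_erase_of_mem hmem]
  have := Finset.card_pos.mpr ⟨x, hmem⟩
  omega

theorem defc_append (adj : List (String × List String)) (comp fresh : List String)
    (h1 : ∀ x ∈ fresh, x ∈ adj.flatMap Prod.snd ∧ x ∉ comp) (h2 : fresh.Nodup) :
    defc adj (comp ++ fresh) + fresh.length = defc adj comp := by
  induction fresh generalizing comp with
  | nil => simp
  | cons y ys ih =>
    have hy := h1 y (by simp)
    have step := defc_one adj comp y hy.1 hy.2
    have hrec := ih (comp ++ [y]) (fun x hx => by
      have hx1 := h1 x (by simp [hx])
      refine ⟨hx1.1, ?_⟩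
      simp only [List.mem_append, List.mem_singleton]
      rintro (h | rfl)
      · exact hx1.2 h
      · exact (List.nodup_cons.mp h2).1 hx) (List.nodup_cons.mp h2).2
    have hsplit : comp ++ y :: ys = (comp ++ [y]) ++ ys := by simp
    rw [hsplit]
    simp only [List.length_cons]
    omega

theorem defc_le (adj : List (String × List String)) (comp : List String) :
    defc adj comp ≤ (adj.flatMap Prod.snd).length := by
  unfold defc
  calc ((adj.flatMap Prod.snd).toFinset \ comp.toFinset).card
      ≤ (adj.flatMap Prod.snd).toFinset.card := Finset.card_le_card Finset.sdiff_subset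
    _ ≤ (adj.flatMap Prod.snd).length := List.toFinset_card_le _

-- characterisation of A's inner neighbour loop
theorem foldA_ex (nbs : List String)
    (comp : PySem.Set String) (stack : List String) :
    ∃ fresh : List String,
      (nbs.foldl componentStepA (comp, stack)).1 = comp ++ fresh ∧
      (nbs.foldl componentStepA (comp, stack)).2 = fresh.reverse ++ stack ∧
      fresh.Nodup ∧ (∀ x ∈ fresh, x ∈ nbs ∧ x ∉ comp) ∧
      (∀ nb ∈ nbs, nb ∈ comp ∨ nb ∈ fresh) := by
  induction nbs generalizing comp stack with
  | nil => exact ⟨[], by simp⟩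
  | cons nb nbs ih =>
    by_cases hnb : nb ∈ comp
    · have hstep : componentStepA (comp, stack) nb = (comp, stack) := by
        simp [componentStepA, hnb]
      rcases ih comp stack with ⟨fresh, h1, h2, h3, h4, h5⟩
      refine ⟨fresh, ?_, ?_, h3, ?_, ?_⟩
      · simpa [List.foldl_cons, hstep] using h1
      · simpa [List.foldl_cons, hstep] using h2
      · exact fun x hx => ⟨List.mem_cons_of_mem _ (h4 x hx).1, (h4 x hx).2⟩
      · intro y hy
        rcases List.mem_cons.mp hy with rfl | hy
        · exact Or.inl hnb
        · exact h5 y hy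
    · have hstep : componentStepA (comp, stack) nb = (comp ++ [nb], nb :: stack) := by
        simp [componentStepA, hnb]
      rcases ih (comp ++ [nb]) (nb :: stack) with ⟨fresh, h1, h2, h3, h4, h5⟩
      refine ⟨nb :: fresh, ?_, ?_, ?_, ?_, ?_⟩
      · simp only [List.foldl_cons, hstep]
        rw [h1]; simp
      · simp only [List.foldl_cons, hstep]
        rw [h2]; simp
      · exact List.nodup_cons.mpr ⟨fun h => (h4 nb h).2 (by simp), h3⟩
      · intro x hx
        rcases List.mem_cons.mp hx with rfl | hx
        · exact ⟨by simp, hnb⟩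
        · exact ⟨List.mem_cons_of_mem _ (h4 x hx).1, fun hc => (h4 x hx).2 (by simp [hc])⟩
      · intro y hy
        rcases List.mem_cons.mp hy with rfl | hy
        · exact Or.inr (by simp)
        · rcases h5 y hy with h | h
          · rcases List.mem_append.mp h with h | h
            · exact Or.inl h
            · simp at h; subst h; exact Or.inr (by simp)
          · exact Or.inr (by simp [h])

def InvA (adj : List (String × List String)) (comp stack : List String) : Prop :=
  ∀ x ∈ comp, x ∈ stack ∨ ∀ nb ∈ pyGetAdj adj x, nb ∈ comp

theorem loopA_main (adj : List (String × List String)) (fuel : Nat)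
    (comp : PySem.Set String) (stack : List String)
    (hf : defc adj comp + stack.length ≤ fuel) (hinv : InvA adj comp stack) :
    (∀ x ∈ comp, x ∈ componentLoopA adj fuel comp stack) ∧
    (∀ x ∈ componentLoopA adj fuel comp stack, ∀ nb ∈ pyGetAdj adj x,
        nb ∈ componentLoopA adj fuel comp stack) := by
  induction fuel generalizing comp stack with
  | zero =>
    have hstack : stack = [] := by
      cases stack with
      | nil => rfl
      | cons a b => simp at hf
    subst hstack
    refine ⟨fun x hx => by simpa [componentLoopA] using hx, fun x hx nb hnb => ?_⟩
    simp only [componentLoopA] at hx ⊢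
    rcases hinv x hx with h | h
    · simp at h
    · exact h nb hnb
  | succ fuel ih =>
    cases stack with
    | nil =>
      refine ⟨fun x hx => by simpa [componentLoopA] using hx, fun x hx nb hnb => ?_⟩
      simp only [componentLoopA] at hx ⊢
      rcases hinv x hx with h | h
      · simp at h
      · exact h nb hnb
    | cons n rest =>
      rcases foldA_ex (pyGetAdj adj n) comp rest with ⟨fresh, h1, h2, h3, h4, h5⟩
      have hU : ∀ x ∈ fresh, x ∈ adj.flatMap Prod.snd ∧ x ∉ comp :=
        fun x hx => ⟨mem_pyGetAdj_flatMap adj n x (h4 x hx).1, (h4 x hx).2⟩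
      have hd := defc_append adj comp fresh hU h3
      have heq : componentLoopA adj (fuel + 1) comp (n :: rest)
          = componentLoopA adj fuel ((pyGetAdj adj n).foldl componentStepA (comp, rest)).1
              ((pyGetAdj adj n).foldl componentStepA (comp, rest)).2 := by
        simp [componentLoopA]
      have hf' : defc adj ((pyGetAdj adj n).foldl componentStepA (comp, rest)).1
          + ((pyGetAdj adj n).foldl componentStepA (comp, rest)).2.length ≤ fuel := by
        rw [h1, h2]
        simp only [List.length_append, List.length_reverse]
        simp only [List.length_cons] at hf
        omega
      have hinv' : InvA adj ((pyGetAdj adj n).foldl componentStepA (comp, rest)).1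
          ((pyGetAdj adj n).foldl componentStepA (comp, rest)).2 := by
        rw [h1, h2]
        intro x hx
        rcases List.mem_append.mp hx with hx | hx
        · rcases hinv x hx with h | h
          · rcases List.mem_cons.mp h with rfl | h
            · refine Or.inr fun nb hnb => ?_
              rcases h5 nb hnb with h' | h'
              · exact List.mem_append.mpr (Or.inl h')
              · exact List.mem_append.mpr (Or.inr h')
            · exact Or.inl (List.mem_append.mpr (Or.inr h))
          · exact Or.inr fun nb hnb => List.mem_append.mpr (Or.inl (h nb hnb))
        · exact Or.inl (List.mem_append.mpr (Or.inl (List.mem_reverse.mpr hx)))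
      rcases ih _ _ hf' hinv' with ⟨hmono, hclosed⟩
      refine ⟨fun x hx => ?_, ?_⟩
      · rw [heq]
        exact hmono x (by rw [h1]; exact List.mem_append.mpr (Or.inl hx))
      · rw [heq]
        exact hclosed

theorem loopA_sound (adj : List (String × List String)) (seeds : List String) (fuel : Nat)
    (comp : PySem.Set String) (stack : List String)
    (hc : ∀ x ∈ comp, Reach adj seeds x) (hs : ∀ x ∈ stack, Reach adj seeds x) :
    ∀ x ∈ componentLoopA adj fuel comp stack, Reach adj seeds x := by
  induction fuel generalizing comp stack with
  | zero => simpa [componentLoopA] using hc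
  | succ fuel ih =>
    cases stack with
    | nil => simpa [componentLoopA] using hc
    | cons n rest =>
      rcases foldA_ex (pyGetAdj adj n) comp rest with ⟨fresh, h1, h2, h3, h4, h5⟩
      have hfresh : ∀ x ∈ fresh, Reach adj seeds x := fun x hx =>
        Reach.step n x (hs n (by simp)) (h4 x hx).1
      have heq : componentLoopA adj (fuel + 1) comp (n :: rest)
          = componentLoopA adj fuel ((pyGetAdj adj n).foldl componentStepA (comp, rest)).1
              ((pyGetAdj adj n).foldl componentStepA (comp, rest)).2 := by
        simp [componentLoopA]
      rw [heq]
      refine ih _ _ ?_ ?_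
      · rw [h1]
        intro x hx
        rcases List.mem_append.mp hx with hx | hx
        · exact hc x hx
        · exact hfresh x hx
      · rw [h2]
        intro x hx
        rcases List.mem_append.mp hx with hx | hx
        · exact hfresh x (List.mem_reverse.mp hx)
        · exact hs x (List.mem_cons_of_mem _ hx)

theorem loopA_nodup (adj : List (String × List String)) (fuel : Nat)
    (comp : PySem.Set String) (stack : List String) (h : comp.Nodup) :
    (componentLoopA adj fuel comp stack).Nodup := by
  induction fuel generalizing comp stack with
  | zero => simpa [componentLoopA] using h
  | succ fuel ih =>
    cases stack with
    | nil => simpa [componentLoopA] using h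
    | cons n rest =>
      rcases foldA_ex (pyGetAdj adj n) comp rest with ⟨fresh, h1, h2, h3, h4, h5⟩
      have heq : componentLoopA adj (fuel + 1) comp (n :: rest)
          = componentLoopA adj fuel ((pyGetAdj adj n).foldl componentStepA (comp, rest)).1
              ((pyGetAdj adj n).foldl componentStepA (comp, rest)).2 := by
        simp [componentLoopA]
      rw [heq]
      refine ih _ _ ?_
      rw [h1]
      refine List.nodup_append.mpr ⟨h, h3, ?_⟩
      intro a ha b hb hab
      exact (h4 b hb).2 (hab ▸ ha)

-- characterisation of B's wave comprehension
theorem mem_waveNext (adj : List (String × List String)) (comp frontier : PySem.Set String)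
    (x : String) :
    x ∈ waveNext adj comp frontier ↔ (x ∉ comp ∧ ∃ n ∈ frontier, x ∈ pyGetAdj adj n) := by
  have inner : ∀ (nbs : List String) (acc : PySem.Set String) (y : String),
      y ∈ nbs.foldl (fun nxt nb => if PySem.Set.contains comp nb then nxt
          else PySem.Set.add nxt nb) acc ↔ y ∈ acc ∨ (y ∈ nbs ∧ y ∉ comp) := by
    intro nbs
    induction nbs with
    | nil => simp
    | cons nb nbs ih =>
      intro acc y
      by_cases hnb : nb ∈ comp
      · simp only [List.foldl_cons]
        rw [if_pos (by simpa [PySem.Set.contains_iff] using hnb)]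
        rw [ih acc y]
        constructor
        · rintro (h | ⟨h1, h2⟩)
          · exact Or.inl h
          · exact Or.inr ⟨List.mem_cons_of_mem _ h1, h2⟩
        · rintro (h | ⟨h1, h2⟩)
          · exact Or.inl h
          · rcases List.mem_cons.mp h1 with rfl | h1
            · exact absurd hnb h2
            · exact Or.inr ⟨h1, h2⟩
      · simp only [List.foldl_cons]
        rw [if_neg (by simpa [PySem.Set.contains_iff] using hnb)]
        rw [ih (PySem.Set.add acc nb) y, PySem.Set.mem_add]
        constructor
        · rintro ((h | rfl) | ⟨h1, h2⟩)
          · exact Or.inl h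
          · exact Or.inr ⟨by simp, hnb⟩
          · exact Or.inr ⟨List.mem_cons_of_mem _ h1, h2⟩
        · rintro (h | ⟨h1, h2⟩)
          · exact Or.inl (Or.inl h)
          · rcases List.mem_cons.mp h1 with rfl | h1
            · exact Or.inl (Or.inr rfl)
            · exact Or.inr ⟨h1, h2⟩
  have outer : ∀ (fr : List String) (acc : PySem.Set String) (y : String),
      y ∈ fr.foldl (fun nxt n => (pyGetAdj adj n).foldl
          (fun nxt nb => if PySem.Set.contains comp nb then nxt
            else PySem.Set.add nxt nb) nxt) acc
        ↔ y ∈ acc ∨ ∃ n ∈ fr, y ∈ pyGetAdj adj n ∧ y ∉ comp := by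
    intro fr
    induction fr with
    | nil => simp
    | cons n fr ih =>
      intro acc y
      simp only [List.foldl_cons]
      rw [ih, inner]
      constructor
      · rintro ((h | ⟨h1, h2⟩) | ⟨m, hm, h1, h2⟩)
        · exact Or.inl h
        · exact Or.inr ⟨n, by simp, h1, h2⟩
        · exact Or.inr ⟨m, List.mem_cons_of_mem _ hm, h1, h2⟩
      · rintro (h | ⟨m, hm, h1, h2⟩)
        · exact Or.inl (Or.inl h)
        · rcases List.mem_cons.mp hm with rfl | hm
          · exact Or.inl (Or.inr ⟨h1, h2⟩)
          · exact Or.inr ⟨m, hm, h1, h2⟩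
  unfold waveNext
  rw [outer]
  simp only [PySem.Set.empty]
  constructor
  · rintro (h | ⟨n, hn, h1, h2⟩)
    · simp at h
    · exact ⟨h2, n, hn, h1⟩
  · rintro ⟨h2, n, hn, h1⟩
    exact Or.inr ⟨n, hn, h1, h2⟩

theorem waveNext_nodup (adj : List (String × List String)) (comp frontier : PySem.Set String) :
    (waveNext adj comp frontier).Nodup := by
  have inner : ∀ (nbs : List String) (acc : PySem.Set String), acc.Nodup →
      (nbs.foldl (fun nxt nb => if PySem.Set.contains comp nb then nxt
        else PySem.Set.add nxt nb) acc).Nodup := by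
    intro nbs
    induction nbs with
    | nil => exact fun acc h => h
    | cons nb nbs ih =>
      intro acc h
      simp only [List.foldl_cons]
      split
      · exact ih acc h
      · exact ih _ (PySem.Set.nodup_add _ _ h)
  have outer : ∀ (fr : List String) (acc : PySem.Set String), acc.Nodup →
      (fr.foldl (fun nxt n => (pyGetAdj adj n).foldl
        (fun nxt nb => if PySem.Set.contains comp nb then nxt
          else PySem.Set.add nxt nb) nxt) acc).Nodup := by
    intro fr
    induction fr with
    | nil => exact fun acc h => h
    | cons n fr ih =>
      intro acc h
      simp only [List.foldl_cons]
      exact ih _ (inner _ acc h)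
  exact outer frontier PySem.Set.empty (by simp [PySem.Set.empty])

def InvB (adj : List (String × List String)) (comp frontier : List String) : Prop :=
  ∀ x ∈ comp, x ∈ frontier ∨ ∀ nb ∈ pyGetAdj adj x, nb ∈ comp

theorem loopB_main (adj : List (String × List String)) (fuel : Nat)
    (comp frontier : PySem.Set String)
    (hf : defc adj comp + 2 ≤ fuel) (hinv : InvB adj comp frontier) :
    (∀ x ∈ comp, x ∈ componentLoopB adj fuel comp frontier) ∧
    (∀ x ∈ componentLoopB adj fuel comp frontier, ∀ nb ∈ pyGetAdj adj x,
        nb ∈ componentLoopB adj fuel comp frontier) := by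
  induction fuel generalizing comp frontier with
  | zero => omega
  | succ fuel ih =>
    by_cases hfr : frontier.isEmpty
    · have heq : componentLoopB adj (fuel + 1) comp frontier = comp := by
        simp [componentLoopB, hfr]
      rw [heq]
      refine ⟨fun x hx => hx, fun x hx nb hnb => ?_⟩
      rcases hinv x hx with h | h
      · rw [List.isEmpty_iff] at hfr
        subst hfr
        simp at h
      · exact h nb hnb
    · have heq : componentLoopB adj (fuel + 1) comp frontier
          = componentLoopB adj fuel (PySem.Set.union comp (waveNext adj comp frontier))
              (waveNext adj comp frontier) := by
        simp [componentLoopB, hfr]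
      set nxt := waveNext adj comp frontier with hnxt
      have hdisj : ∀ x ∈ nxt, x ∉ comp := fun x hx => ((mem_waveNext adj comp frontier x).mp hx).1
      have hn : nxt.Nodup := waveNext_nodup adj comp frontier
      have hunion : PySem.Set.union comp nxt = comp ++ nxt := by
        show PySem.Set.update comp nxt = comp ++ nxt
        exact PySem.Set.update_eq_append_of_disjoint _ _ hn hdisj
      have hclo : ∀ n ∈ frontier, ∀ nb ∈ pyGetAdj adj n, nb ∈ comp ∨ nb ∈ nxt := by
        intro n hn' nb hnb
        by_cases hc : nb ∈ comp
        · exact Or.inl hc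
        · exact Or.inr ((mem_waveNext adj comp frontier nb).mpr ⟨hc, n, hn', hnb⟩)
      have hinv' : InvB adj (PySem.Set.union comp nxt) nxt := by
        rw [hunion]
        intro x hx
        rcases List.mem_append.mp hx with hx | hx
        · rcases hinv x hx with h | h
          · exact Or.inr fun nb hnb => by
              rcases hclo x h nb hnb with h' | h'
              · exact List.mem_append.mpr (Or.inl h')
              · exact List.mem_append.mpr (Or.inr h')
          · exact Or.inr fun nb hnb => List.mem_append.mpr (Or.inl (h nb hnb))
        · exact Or.inl hx
      cases hne : nxt with
      | nil =>
        have hres : componentLoopB adj (fuel + 1) comp frontier = comp := by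
          rw [heq, hunion, hne, List.append_nil]
          cases fuel with
          | zero => omega
          | succ f => simp [componentLoopB]
        rw [hres]
        refine ⟨fun x hx => hx, fun x hx nb hnb => ?_⟩
        rcases hinv x hx with h | h
        · rcases hclo x h nb hnb with h' | h'
          · exact h'
          · rw [hne] at h'
            simp at h'
        · exact h nb hnb
      | cons y ys =>
        have hU : ∀ x ∈ nxt, x ∈ adj.flatMap Prod.snd ∧ x ∉ comp := by
          intro x hx
          rcases (mem_waveNext adj comp frontier x).mp hx with ⟨h1, n, hn', h2⟩
          exact ⟨mem_pyGetAdj_flatMap adj n x h2, h1⟩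
        have hd := defc_append adj comp nxt hU hn
        have hlen : 1 ≤ nxt.length := by rw [hne]; simp
        have hf' : defc adj (PySem.Set.union comp nxt) + 2 ≤ fuel := by
          rw [hunion]
          omega
        rcases ih (PySem.Set.union comp nxt) nxt hf' hinv' with ⟨hmono, hclosed⟩
        rw [heq]
        refine ⟨fun x hx => hmono x ?_, hclosed⟩
        rw [hunion]
        exact List.mem_append.mpr (Or.inl hx)

theorem loopB_sound (adj : List (String × List String)) (seeds : List String) (fuel : Nat)
    (comp frontier : PySem.Set String)
    (hc : ∀ x ∈ comp, Reach adj seeds x) (hs : ∀ x ∈ frontier, Reach adj seeds x) :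
    ∀ x ∈ componentLoopB adj fuel comp frontier, Reach adj seeds x := by
  induction fuel generalizing comp frontier with
  | zero => simpa [componentLoopB] using hc
  | succ fuel ih =>
    by_cases hfr : frontier.isEmpty
    · simpa [componentLoopB, hfr] using hc
    · have heq : componentLoopB adj (fuel + 1) comp frontier
          = componentLoopB adj fuel (PySem.Set.union comp (waveNext adj comp frontier))
              (waveNext adj comp frontier) := by
        simp [componentLoopB, hfr]
      rw [heq]
      have hnx : ∀ x ∈ waveNext adj comp frontier, Reach adj seeds x := by
        intro x hx
        rcases (mem_waveNext adj comp frontier x).mp hx with ⟨h1, n, hn', h2⟩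
        exact Reach.step n x (hs n hn') h2
      refine ih _ _ ?_ hnx
      intro x hx
      rcases (PySem.Set.mem_union _ _ _).mp hx with h | h
      · exact hc x h
      · exact hnx x h

theorem loopB_nodup (adj : List (String × List String)) (fuel : Nat)
    (comp frontier : PySem.Set String) (h : comp.Nodup) :
    (componentLoopB adj fuel comp frontier).Nodup := by
  induction fuel generalizing comp frontier with
  | zero => simpa [componentLoopB] using h
  | succ fuel ih =>
    by_cases hfr : frontier.isEmpty
    · simpa [componentLoopB, hfr] using h
    · have heq : componentLoopB adj (fuel + 1) comp frontier
          = componentLoopB adj fuel (PySem.Set.union comp (waveNext adj comp frontier))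
              (waveNext adj comp frontier) := by
        simp [componentLoopB, hfr]
      rw [heq]
      exact ih _ _ (PySem.Set.nodup_union _ _ h)

-- ===== VERDICT (by name: the statement is the Claim_ definition above) =====
theorem component_of_py_spec : Claim_equal_component_of_py := by
  intro adj seeds _
  unfold Spec_component_of_py component_of_py component_of_py_alt
  have hseedA : ∀ x ∈ PySem.Set.ofList seeds, x ∈ seeds.reverse := by
    intro x hx
    exact List.mem_reverse.mpr ((PySem.Set.mem_ofList _ _).mp hx)
  have hfA : defc adj (PySem.Set.ofList seeds) + seeds.reverse.length
      ≤ seeds.length + (adj.flatMap Prod.snd).length + 1 := by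
    have := defc_le adj (PySem.Set.ofList seeds)
    simp only [List.length_reverse]
    omega
  have hA := loopA_main adj (seeds.length + (adj.flatMap Prod.snd).length + 1)
      (PySem.Set.ofList seeds) seeds.reverse hfA (fun x hx => Or.inl (hseedA x hx))
  have hAsound := loopA_sound adj seeds (seeds.length + (adj.flatMap Prod.snd).length + 1)
      (PySem.Set.ofList seeds) seeds.reverse
      (fun x hx => Reach.seed x ((PySem.Set.mem_ofList _ _).mp hx))
      (fun x hx => Reach.seed x (List.mem_reverse.mp hx))
  have hfB : defc adj (PySem.Set.ofList seeds) + 2 ≤ (adj.flatMap Prod.snd).length + 2 := by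
    have := defc_le adj (PySem.Set.ofList seeds)
    omega
  have hB := loopB_main adj ((adj.flatMap Prod.snd).length + 2)
      (PySem.Set.ofList seeds) (PySem.Set.ofList seeds) hfB (fun x hx => Or.inl hx)
  have hBsound := loopB_sound adj seeds ((adj.flatMap Prod.snd).length + 2)
      (PySem.Set.ofList seeds) (PySem.Set.ofList seeds)
      (fun x hx => Reach.seed x ((PySem.Set.mem_ofList _ _).mp hx))
      (fun x hx => Reach.seed x ((PySem.Set.mem_ofList _ _).mp hx))
  have hreachA : ∀ x, Reach adj seeds x →
      x ∈ componentLoopA adj (seeds.length + (adj.flatMap Prod.snd).length + 1)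
        (PySem.Set.ofList seeds) seeds.reverse := by
    intro x hx
    induction hx with
    | seed n h => exact hA.1 n ((PySem.Set.mem_ofList _ _).mpr h)
    | step n nb _ hnb ih => exact hA.2 n ih nb hnb
  have hreachB : ∀ x, Reach adj seeds x →
      x ∈ componentLoopB adj ((adj.flatMap Prod.snd).length + 2)
        (PySem.Set.ofList seeds) (PySem.Set.ofList seeds) := by
    intro x hx
    induction hx with
    | seed n h => exact hB.1 n ((PySem.Set.mem_ofList _ _).mpr h)
    | step n nb _ hnb ih => exact hB.2 n ih nb hnb
  rw [PySem.List.sorted_id_eq_sorted_id_iff_perm]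
  refine (List.perm_ext_iff_of_nodup ?_ ?_).mpr ?_
  · exact loopA_nodup adj _ _ _ (PySem.Set.nodup_ofList _)
  · exact loopB_nodup adj _ _ _ (PySem.Set.nodup_ofList _)
  · intro a
    constructor
    · intro h
      exact hreachB a (hAsound a h)
    · intro h
      exact hreachA a (hBsound a h)
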